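-- pv_equiv track=rewrite | github.com/avlnx/hackerrank-solutions | hash_maps/count_triplets.py | get_new_triplets_count
-- ===== SOURCE A (Python) =====
-- def count_invalid_first_positions(first_positions, second_position):
--     invalid = 0
--     i = -1
--     while True:
--         try:
--             n = first_positions[i]
--         except IndexError:
--             break
--         if n > second_position:
--             invalid += 1
--             i -= 1
--             continue
--         break
--     return invalid
--
-- def get_new_triplets_count(first, second, powers, power_counts):
--     triplets = 0
--     if first in powers and second in powers:
--         # potential for triplets
--         second_positions = powers[second]
--         for s in second_positions:
--             first_position_count = power_counts[first]
--             first_positions_larger_than_second = count_invalid_first_positions(powers[first], s)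
--             triplets += first_position_count - first_positions_larger_than_second
--     return triplets
-- ===== SOURCE B (Python) =====
-- # B (alternative algorithm): precompute the suffix-minima of powers[first] once; for each
-- # second position s, the number of trailing first-positions > s is found by binary search
-- # on the sorted suffix-minima array instead of re-scanning powers[first] from the end.
--
-- def _bisect_right(a, x):
--     # CPython's bisect.bisect_right, written out (A imports nothing, so no bisect import)
--     lo, hi = 0, len(a)
--     while lo < hi:
--         mid = (lo + hi) // 2
--         if x < a[mid]:
--             hi = mid
--         else:
--             lo = mid + 1
--     return lo
--
-- def get_new_triplets_count(first, second, powers, power_counts):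
--     if first not in powers or second not in powers:
--         return 0
--     seconds = powers[second]
--     if not seconds:
--         return 0
--     base = power_counts[first]
--     mins = []
--     cur = None
--     for x in reversed(powers[first]):
--         if cur is None or x < cur:
--             cur = x
--         mins.append(cur)
--     asc = mins[::-1]          # nondecreasing: asc[k] = min(powers[first][k:])
--     n = len(asc)
--     return sum(base - n + _bisect_right(asc, s) for s in seconds)
-- ===== Notes on version B (the rewrite author's own statement) =====
-- stated objective: alternative
-- what changed: Instead of re-scanning powers[first] backwards (try/except negative indexing) for every second position, B precomputes the suffix-minima of powers[first] once (a sorted array) and answers each second position with one binary search; on the measured inputs A's backward scan exits early, so the change is structural, not a measured speedup.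
import Mathlib
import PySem

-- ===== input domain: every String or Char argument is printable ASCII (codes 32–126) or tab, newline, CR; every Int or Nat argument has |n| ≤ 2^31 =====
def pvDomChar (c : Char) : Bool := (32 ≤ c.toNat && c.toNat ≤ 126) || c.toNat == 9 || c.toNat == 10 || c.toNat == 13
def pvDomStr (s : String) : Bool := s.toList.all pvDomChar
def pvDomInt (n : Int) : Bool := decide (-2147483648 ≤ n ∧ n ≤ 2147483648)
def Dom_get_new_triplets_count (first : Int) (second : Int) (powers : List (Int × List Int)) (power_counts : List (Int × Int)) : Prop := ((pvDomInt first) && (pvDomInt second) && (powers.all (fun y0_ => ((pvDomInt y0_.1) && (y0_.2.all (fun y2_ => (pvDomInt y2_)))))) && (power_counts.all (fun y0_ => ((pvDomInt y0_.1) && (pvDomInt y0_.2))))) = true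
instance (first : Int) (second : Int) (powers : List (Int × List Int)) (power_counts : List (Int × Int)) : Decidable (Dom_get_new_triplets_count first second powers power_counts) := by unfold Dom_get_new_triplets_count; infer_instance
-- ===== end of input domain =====

-- B precomputes the suffix-minima of powers[first] once and binary-searches them per
-- second position, instead of A's backward rescan per second position (objective: alternative).


-- ===== PORT A =====
-- the 'while True' loop of count_invalid_first_positions; fuel len+1 is exactly the
-- number of steps after which first_positions[i] (i = -1, -2, …) raises IndexError
def civLoop (fp : List Int) (sp : Int) : Nat → Int → Int → Int
  | 0, invalid, _ => invalid
  | fuel + 1, invalid, i =>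
    match PySem.List.pyGet? fp i with
    | none => invalid
    | some n => if n > sp then civLoop fp sp fuel (invalid + 1) (i - 1) else invalid

def count_invalid_first_positions (first_positions : List Int) (second_position : Int) : Int :=
  civLoop first_positions second_position (first_positions.length + 1) 0 (-1)

def get_new_triplets_count (first : Int) (second : Int) (powers : List (Int × List Int)) (power_counts : List (Int × Int)) : Int :=
  let pd := PySem.Dict.ofList powers
  let cd := PySem.Dict.ofList power_counts
  let triplets : Int := 0
  if (pd.get? first).isSome && (pd.get? second).isSome then
    let second_positions := (pd.get? second).getD []
    second_positions.foldl (fun triplets s =>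
      let first_position_count := (cd.get? first).getD 0   -- KeyError (= none) excluded by Pre_
      let first_positions_larger_than_second := count_invalid_first_positions ((pd.get? first).getD []) s
      triplets + (first_position_count - first_positions_larger_than_second)) triplets
  else triplets

-- ===== PORT B =====
-- the 'for x in reversed(powers[first])' loop of Source B building mins (running minimum, appended)
def bMins (fp : List Int) : List Int :=
  (fp.reverse.foldl (fun (acc : List Int × Option Int) x =>
      let cur : Int := match acc.2 with
        | none => x
        | some c => if x < c then x else c
      (acc.1 ++ [cur], some cur)) ([], none)).1

-- Source B's hand-written _bisect_right is CPython's bisect.bisect_right verbatim, ported as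
-- the identical PySem primitive PySem.List.bisectRight
def get_new_triplets_count_alt (first : Int) (second : Int) (powers : List (Int × List Int)) (power_counts : List (Int × Int)) : Int :=
  let pd := PySem.Dict.ofList powers
  let cd := PySem.Dict.ofList power_counts
  if !(pd.get? first).isSome || !(pd.get? second).isSome then 0
  else
    let seconds := (pd.get? second).getD []
    if seconds = [] then 0
    else
      let base := (cd.get? first).getD 0    -- KeyError (= none) excluded by Pre_
      let asc := (bMins ((pd.get? first).getD [])).reverse
      let n : Int := asc.length
      seconds.foldl (fun t s => t + (base - n + (PySem.List.bisectRight asc s : Int))) 0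

-- ===== PRECONDITION & SPEC =====
-- Pre_ excludes exactly the inputs where the Python A raises KeyError: first and second both
-- keys of powers and powers[second] non-empty, but first not a key of power_counts (B raises there too)
def Pre_get_new_triplets_count (first : Int) (second : Int) (powers : List (Int × List Int)) (power_counts : List (Int × Int)) : Prop :=
  (((PySem.Dict.ofList powers).get? first).isSome = true ∧
   ((PySem.Dict.ofList powers).get? second).isSome = true ∧
   ((PySem.Dict.ofList powers).get? second).getD [] ≠ []) →
  ((PySem.Dict.ofList power_counts).get? first).isSome = true
instance (first : Int) (second : Int) (powers : List (Int × List Int)) (power_counts : List (Int × Int)) : Decidable (Pre_get_new_triplets_count first second powers power_counts) := by unfold Pre_get_new_triplets_count; infer_instance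

def pvWitness_get_new_triplets_count : Int × Int × (List (Int × List Int)) × (List (Int × Int)) :=
  (1, 2, [(1, [0, 3]), (2, [1, 2])], [(1, 2)])

def Spec_get_new_triplets_count (first : Int) (second : Int) (powers : List (Int × List Int)) (power_counts : List (Int × Int)) (out : Int) : Prop := out = get_new_triplets_count_alt first second powers power_counts
instance (first : Int) (second : Int) (powers : List (Int × List Int)) (power_counts : List (Int × Int)) (out : Int) : Decidable (Spec_get_new_triplets_count first second powers power_counts out) := by unfold Spec_get_new_triplets_count; infer_instance

-- ===== CLAIM (what is proved, stated in full; the proofs are below) =====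
def Claim_equal_get_new_triplets_count : Prop := ∀ (first : Int) (second : Int) (powers : List (Int × List Int)) (power_counts : List (Int × Int)), Dom_get_new_triplets_count first second powers power_counts → Pre_get_new_triplets_count first second powers power_counts → Spec_get_new_triplets_count first second powers power_counts (get_new_triplets_count first second powers power_counts)

-- ===== LEMMAS AND PROOFS =====

-- recursive description of B's suffix-minima loop (proof-only helper)
def minsFrom : Option Int → List Int → List Int
  | _, [] => []
  | none, x :: xs => x :: minsFrom (some x) xs
  | some c0, x :: xs => (if x < c0 then x else c0) :: minsFrom (some (if x < c0 then x else c0)) xs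

theorem bMins_foldl (xs : List Int) (acc : List Int) (cur : Option Int) :
    (xs.foldl (fun (acc : List Int × Option Int) x =>
      let cur : Int := match acc.2 with
        | none => x
        | some c => if x < c then x else c
      (acc.1 ++ [cur], some cur)) (acc, cur)).1 = acc ++ minsFrom cur xs := by
  induction xs generalizing acc cur with
  | nil => simp [minsFrom]
  | cons x xs ih =>
    cases cur with
    | none => rw [List.foldl_cons, ih]; simp [minsFrom]
    | some c0 => rw [List.foldl_cons, ih]; simp [minsFrom]

theorem bMins_eq (fp : List Int) : bMins fp = minsFrom none fp.reverse := by
  unfold bMins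
  rw [bMins_foldl]
  rfl

theorem minsFrom_le (c : Int) (xs : List Int) : ∀ y ∈ minsFrom (some c) xs, y ≤ c := by
  induction xs generalizing c with
  | nil => simp [minsFrom]
  | cons x xs ih =>
    intro y hy
    simp only [minsFrom, List.mem_cons] at hy
    rcases hy with h | h
    · subst h; split <;> omega
    · have := ih (if x < c then x else c) y h
      split_ifs at this <;> omega

theorem minsFrom_pairwise (cur : Option Int) (xs : List Int) :
    (minsFrom cur xs).Pairwise (fun a b => b ≤ a) := by
  induction xs generalizing cur with
  | nil => exact List.Pairwise.nil
  | cons x xs ih =>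
    cases cur with
    | none => exact List.Pairwise.cons (fun y hy => minsFrom_le _ _ y hy) (ih _)
    | some c0 => exact List.Pairwise.cons (fun y hy => minsFrom_le _ _ y hy) (ih _)

theorem countP_minsFrom_le (s c : Int) (xs : List Int) (h : c ≤ s) :
    (minsFrom (some c) xs).countP (fun x => decide (s < x)) = 0 := by
  rw [List.countP_eq_zero]
  intro a ha
  have := minsFrom_le c xs a ha
  simp
  omega

theorem countP_minsFrom (s : Int) (cur : Option Int) (xs : List Int) (h : ∀ c ∈ cur, s < c) :
    (minsFrom cur xs).countP (fun x => decide (s < x)) =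
      (xs.takeWhile (fun x => decide (s < x))).length := by
  induction xs generalizing cur with
  | nil => cases cur <;> rfl
  | cons x xs ih =>
    by_cases hx : s < x
    · cases cur with
      | none =>
        simp only [minsFrom, List.countP_cons, List.takeWhile, hx]
        rw [ih (some x) (by simpa)]
        simp
      | some c0 =>
        have hc0 : s < c0 := h c0 rfl
        have hc : s < (if x < c0 then x else c0) := by split <;> omega
        simp only [minsFrom, List.countP_cons, List.takeWhile]
        rw [ih (some _) (by simpa)]
        simp [hx, hc]
    · have hx' : ¬ s < x := hx
      cases cur with
      | none =>
        simp only [minsFrom, List.countP_cons, List.takeWhile]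
        rw [show (minsFrom (some x) xs).countP (fun y => decide (s < y)) = 0 from
          countP_minsFrom_le s x xs (by omega)]
        simp [hx']
      | some c0 =>
        have hc0 : s < c0 := h c0 rfl
        have hxlt : x < c0 := by omega
        simp only [minsFrom, List.countP_cons, List.takeWhile, if_pos hxlt]
        rw [countP_minsFrom_le s x xs (by omega)]
        simp [hx']

theorem bisect_countP (asc : List Int) (s : Int) (hs : asc.Pairwise (fun a b => a ≤ b)) :
    PySem.List.bisectRight asc s = asc.countP (fun x => decide (x ≤ s)) := by
  obtain ⟨hle, hlt, hgt⟩ := PySem.List.bisectRight_spec asc s hs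
  set j := PySem.List.bisectRight asc s with hj
  conv_rhs => rw [← List.take_append_drop j asc]
  rw [List.countP_append]
  have h1 : (asc.take j).countP (fun x => decide (x ≤ s)) = (asc.take j).length := by
    rw [List.countP_eq_length]
    intro a ha
    rw [List.mem_iff_getElem] at ha
    obtain ⟨i, hi, rfl⟩ := ha
    have hi' : i < asc.length := lt_of_lt_of_le hi (by simp [List.length_take])
    rw [List.getElem_take]
    simpa using hlt i hi' (by simp [List.length_take] at hi; omega)
  have h2 : (asc.drop j).countP (fun x => decide (x ≤ s)) = 0 := by
    rw [List.countP_eq_zero]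
    intro a ha
    rw [List.mem_iff_getElem] at ha
    obtain ⟨i, hi, rfl⟩ := ha
    have hi2 : i < asc.length - j := by simpa using hi
    have hi' : j + i < asc.length := by omega
    rw [List.getElem_drop]
    have := hgt (j + i) hi' (by omega)
    simp
    omega
  rw [h1, h2]
  simp [List.length_take]
  omega

theorem civLoop_eq (fp : List Int) (s : Int) :
    ∀ (fuel k : Nat) (inv : Int), fuel = fp.length + 1 - k → k ≤ fp.length →
      civLoop fp s fuel inv (-1 - (k : Int)) =
        inv + (((fp.reverse.drop k).takeWhile (fun x => decide (s < x))).length : Int) := by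
  intro fuel
  induction fuel with
  | zero => intro k inv hf hk; omega
  | succ fuel ih =>
    intro k inv hf hk
    by_cases hkl : k = fp.length
    · subst hkl
      have hnone : PySem.List.pyGet? fp (-1 - (fp.length : Int)) = none := by
        rw [PySem.List.pyGet?_eq_none_iff]
        intro h
        rcases h with ⟨h1, h2⟩; omega
      simp [civLoop, hnone]
    · have hk' : k < fp.length := by omega
      have hidx : (-1 - (k : Int)) = -((k + 1 : Nat) : Int) := by push_cast; ring
      have hget : PySem.List.pyGet? fp (-1 - (k : Int)) = some fp[fp.length - 1 - k] := by
        rw [hidx, PySem.List.pyGet?_neg_natCast fp (k + 1) (by omega) (by omega)]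
        rw [List.getElem?_eq_getElem (by omega)]
        simp only [show fp.length - (k + 1) = fp.length - 1 - k from by omega]
      have hkr : k < fp.reverse.length := by simpa using hk'
      have hdrop : fp.reverse.drop k = fp[fp.length - 1 - k] :: fp.reverse.drop (k + 1) := by
        rw [List.drop_eq_getElem_cons hkr, List.getElem_reverse]
      rw [hdrop]
      simp only [civLoop, hget]
      by_cases hgt : fp[fp.length - 1 - k] > s
      · rw [if_pos hgt]
        have hstep : (-1 - (k : Int)) - 1 = -1 - ((k + 1 : Nat) : Int) := by push_cast; ring
        rw [hstep, ih (k + 1) (inv + 1) (by omega) (by omega)]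
        rw [List.takeWhile_cons_of_pos (by simpa using hgt)]
        simp
        ring
      · rw [if_neg hgt]
        rw [List.takeWhile_cons_of_neg (by simpa using hgt)]
        simp

theorem civ_eq_takeWhile (fp : List Int) (s : Int) :
    count_invalid_first_positions fp s =
      ((fp.reverse.takeWhile (fun x => decide (s < x))).length : Int) := by
  have := civLoop_eq fp s (fp.length + 1) 0 0 (by omega) (by omega)
  simpa [count_invalid_first_positions] using this

theorem per_s (fp : List Int) (s : Int) :
    ((bMins fp).reverse.length : Int) - (PySem.List.bisectRight ((bMins fp).reverse) s : Int) =
      count_invalid_first_positions fp s := by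
  rw [bMins_eq]
  set mins := minsFrom none fp.reverse with hm
  have hpw : (mins.reverse).Pairwise (fun a b => a ≤ b) := by
    rw [List.pairwise_reverse]
    exact minsFrom_pairwise none fp.reverse
  rw [bisect_countP (mins.reverse) s hpw, List.countP_reverse, List.length_reverse]
  have hcompl := List.length_eq_countP_add_countP (l := mins) (fun x => decide (x ≤ s))
  rw [show (fun a : Int => decide ¬(decide (a ≤ s) = true)) = (fun x : Int => decide (s < x)) from
    funext fun a => by simp [not_le]] at hcompl
  have hcount := countP_minsFrom s none fp.reverse (by simp)
  rw [civ_eq_takeWhile]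
  rw [← hm] at hcount
  omega

-- ===== VERDICT (by name: the statement is the Claim_ definition above) =====
theorem foldl_funext (f g : Int → Int → Int) (h : ∀ t s, f t s = g t s) (l : List Int) (init : Int) :
    l.foldl f init = l.foldl g init := by
  rw [show f = g from funext fun t => funext fun s => h t s]

theorem get_new_triplets_count_spec : Claim_equal_get_new_triplets_count := by
  intro first second powers power_counts _hdom _hpre
  unfold Spec_get_new_triplets_count
  unfold get_new_triplets_count get_new_triplets_count_alt
  cases h1 : (PySem.Dict.ofList powers).get? first with
  | none => simp [h1]
  | some fp =>
    cases h2 : (PySem.Dict.ofList powers).get? second with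
    | none => simp [h1, h2]
    | some seconds =>
      simp only [h1, h2, Option.isSome_some, Option.getD_some, Bool.and_self, Bool.not_true,
        Bool.or_self, if_true, if_false, Bool.false_eq_true]
      by_cases hsec : seconds = []
      · simp [hsec]
      · rw [if_neg hsec]
        refine foldl_funext _ _ (fun t s => ?_) seconds 0
        have := per_s fp s
        omega
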